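-- pv_equiv track=rewrite | github.com/Polarisjame/hdu-compiler-exam | compiler/task1/main2.py | judgenum
-- ===== SOURCE A (Python) =====
-- def judgenum(x):
--     if len(x) >= 3:
--         if x[0:2] == "0x" or x[0:2] == "0X":
--             f = True
--             for i in range(2, len(x)):
--                 if not ('0' <= x[i] <= '9') and not ('A' <= x[i] <= 'F') and not ('a' <= x[i] <= 'f'):
--                     f = False
--             if f:
--                 return 1;
--     if len(x) >= 3:
--         if x[0:2] == "0o" or x[0:2] == "0O":
--             f = True
--             for i in range(2, len(x)):
--                 if not ('0' <= x[i] <= '9'):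
--                     f = False
--             if f:
--                 return 2
--     f = True
--     for i in range(0, len(x)):
--         if not ('0' <= x[i] <= '9'):
--             f = False
--     if f:
--         return 3
--     return 0
-- ===== SOURCE B (Python) =====
-- def judgenum(x):
--     # single-pass DFA: states 0 start, 1 "0", 2 decimal, 3 "0x/0X", 4 hex digits,
--     # 5 "0o/0O", 6 octal-quirk digits, 7 dead
--     s = 0
--     for c in x:
--         if s == 0:
--             s = 1 if c == '0' else (2 if '1' <= c <= '9' else 7)
--         elif s == 1:
--             if c in 'xX':
--                 s = 3
--             elif c in 'oO':
--                 s = 5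
--             elif '0' <= c <= '9':
--                 s = 2
--             else:
--                 s = 7
--         elif s == 2:
--             s = 2 if '0' <= c <= '9' else 7
--         elif s == 3 or s == 4:
--             s = 4 if ('0' <= c <= '9' or 'A' <= c <= 'F' or 'a' <= c <= 'f') else 7
--         elif s == 5 or s == 6:
--             s = 6 if '0' <= c <= '9' else 7
--         else:
--             s = 7
--     return (3, 3, 3, 0, 1, 0, 2, 0)[s]
-- ===== Notes on version B (the rewrite author's own statement) =====
-- stated objective: alternative
-- what changed: Replaces A's three separate whole-string scan loops (hex, octal, decimal, each always scanning to the end) by a single left-to-right deterministic finite automaton pass with a final state-to-result table, preserving A's octal quirk (digits 0-9 accepted after 0o).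
import Mathlib
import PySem

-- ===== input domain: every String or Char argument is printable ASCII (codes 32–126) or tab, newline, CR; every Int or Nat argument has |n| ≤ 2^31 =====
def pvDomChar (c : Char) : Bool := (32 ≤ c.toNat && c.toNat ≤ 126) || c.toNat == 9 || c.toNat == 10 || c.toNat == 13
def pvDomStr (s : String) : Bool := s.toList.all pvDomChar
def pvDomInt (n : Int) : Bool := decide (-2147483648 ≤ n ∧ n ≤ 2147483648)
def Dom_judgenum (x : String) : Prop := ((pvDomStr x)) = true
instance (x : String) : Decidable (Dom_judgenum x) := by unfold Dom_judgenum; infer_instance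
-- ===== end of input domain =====

-- B replaces A's three separate whole-string scan loops by a single one-pass DFA with a final
-- state-to-result table; same return value on every input.

-- ===== PORT A =====
def judgenum (x : String) : Int :=
  let cs := x.toList
  let n : Int := (cs.length : Int)
  if 3 ≤ n ∧
     (PySem.List.slice cs (some 0) (some 2) = ['0', 'x'] ∨
      PySem.List.slice cs (some 0) (some 2) = ['0', 'X']) ∧
     (PySem.List.pyRange 2 n 1).foldl (fun f i =>
        let c := PySem.List.pyGetD cs i ' '
        if ¬('0' ≤ c ∧ c ≤ '9') ∧ ¬('A' ≤ c ∧ c ≤ 'F') ∧ ¬('a' ≤ c ∧ c ≤ 'f')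
        then false else f) true = true
  then 1
  else if 3 ≤ n ∧
     (PySem.List.slice cs (some 0) (some 2) = ['0', 'o'] ∨
      PySem.List.slice cs (some 0) (some 2) = ['0', 'O']) ∧
     (PySem.List.pyRange 2 n 1).foldl (fun f i =>
        let c := PySem.List.pyGetD cs i ' '
        if ¬('0' ≤ c ∧ c ≤ '9') then false else f) true = true
  then 2
  else if (PySem.List.pyRange 0 n 1).foldl (fun f i =>
        let c := PySem.List.pyGetD cs i ' '
        if ¬('0' ≤ c ∧ c ≤ '9') then false else f) true = true
  then 3
  else 0

-- ===== PORT B =====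
-- states: 0 start, 1 "0", 2 decimal, 3 "0x/0X", 4 hex digits, 5 "0o/0O", 6 octal digits, 7 dead
def dfaStep (s : Nat) (c : Char) : Nat :=
  if s = 0 then (if c = '0' then 1 else if '1' ≤ c ∧ c ≤ '9' then 2 else 7)
  else if s = 1 then
    (if c = 'x' ∨ c = 'X' then 3
     else if c = 'o' ∨ c = 'O' then 5
     else if '0' ≤ c ∧ c ≤ '9' then 2 else 7)
  else if s = 2 then (if '0' ≤ c ∧ c ≤ '9' then 2 else 7)
  else if s = 3 ∨ s = 4 then
    (if ('0' ≤ c ∧ c ≤ '9') ∨ ('A' ≤ c ∧ c ≤ 'F') ∨ ('a' ≤ c ∧ c ≤ 'f') then 4 else 7)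
  else if s = 5 ∨ s = 6 then (if '0' ≤ c ∧ c ≤ '9' then 6 else 7)
  else 7

def dfaOut : List Int := [3, 3, 3, 0, 1, 0, 2, 0]

def judgenum_alt (x : String) : Int :=
  dfaOut.getD (x.toList.foldl dfaStep 0) 0

-- ===== PRECONDITION & SPEC =====
def Spec_judgenum (x : String) (out : Int) : Prop := out = judgenum_alt x
instance (x : String) (out : Int) : Decidable (Spec_judgenum x out) := by unfold Spec_judgenum; infer_instance

-- ===== CLAIM (what is proved, stated in full; the proofs are below) =====
def Claim_equal_judgenum : Prop := ∀ (x : String), Dom_judgenum x → Spec_judgenum x (judgenum x)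

-- ===== LEMMAS AND PROOFS =====
def isDig (c : Char) : Bool := decide ('0' ≤ c ∧ c ≤ '9')
def isHex (c : Char) : Bool :=
  decide (('0' ≤ c ∧ c ≤ '9') ∨ ('A' ≤ c ∧ c ≤ 'F') ∨ ('a' ≤ c ∧ c ≤ 'f'))

-- the common closed form both programs are reduced to
def closedForm (cs : List Char) : Int :=
  if 3 ≤ cs.length ∧ (cs.take 2 = ['0', 'x'] ∨ cs.take 2 = ['0', 'X']) ∧ (cs.drop 2).all isHex then 1
  else if 3 ≤ cs.length ∧ (cs.take 2 = ['0', 'o'] ∨ cs.take 2 = ['0', 'O']) ∧ (cs.drop 2).all isDig then 2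
  else if cs.all isDig then 3
  else 0

-- A's flag loop is an `all` over the scanned suffix
theorem flagFold (p : Char → Prop) [DecidablePred p] (l : List Char) (b : Bool) :
    l.foldl (fun f c => if p c then false else f) b = (b && l.all (fun c => !decide (p c))) := by
  induction l generalizing b with
  | nil => simp
  | cons c t ih =>
    by_cases h : p c
    · rw [List.foldl_cons, if_pos h, ih]; simp [h]
    · rw [List.foldl_cons, if_neg h, ih]; simp [h]

theorem hexneg : (fun c => !decide (¬('0' ≤ c ∧ c ≤ '9') ∧ ¬('A' ≤ c ∧ c ≤ 'F') ∧ ¬('a' ≤ c ∧ c ≤ 'f'))) = isHex := by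
  funext c; rw [Bool.eq_iff_iff]; simp [isHex, not_lt]

theorem digneg : (fun c => !decide (¬('0' ≤ c ∧ c ≤ '9'))) = isDig := by
  funext c; rw [Bool.eq_iff_iff]; simp [isDig, not_lt]

theorem toNat2 : (2:Int).toNat = 2 := rfl

theorem slice2 (cs : List Char) : PySem.List.slice cs (some 0) (some 2) = cs.take 2 := by
  simp [PySem.List.slice_zero_start, PySem.List.slice_to, toNat2]

theorem judgenum_closed (x : String) : judgenum x = closedForm x.toList := by
  simp only [judgenum]
  rw [PySem.List.foldl_pyRange_pyGetD' x.toList ' '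
      (fun f c => if ¬('0' ≤ c ∧ c ≤ '9') ∧ ¬('A' ≤ c ∧ c ≤ 'F') ∧ ¬('a' ≤ c ∧ c ≤ 'f') then false else f)
      true (a := 2) (by norm_num),
     PySem.List.foldl_pyRange_pyGetD' x.toList ' '
      (fun f c => if ¬('0' ≤ c ∧ c ≤ '9') then false else f) true (a := 2) (by norm_num),
     PySem.List.foldl_pyRange_zero_pyGetD' x.toList ' '
      (fun f c => if ¬('0' ≤ c ∧ c ≤ '9') then false else f) true,
     flagFold, flagFold, flagFold, hexneg, digneg]
  simp only [closedForm, slice2, Nat.ofNat_le_cast, Bool.true_and, toNat2]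

-- DFA runs from each state
theorem run7 (l : List Char) : l.foldl dfaStep 7 = 7 := by
  induction l with
  | nil => rfl
  | cons c t ih => simpa [dfaStep] using ih

theorem run2 (l : List Char) : l.foldl dfaStep 2 = if l.all isDig then 2 else 7 := by
  induction l with
  | nil => rfl
  | cons c t ih =>
    by_cases h : '0' ≤ c ∧ c ≤ '9' <;>
      simp [dfaStep, h, ih, isDig, run7]

theorem run4 (l : List Char) : l.foldl dfaStep 4 = if l.all isHex then 4 else 7 := by
  induction l with
  | nil => rfl
  | cons c t ih =>
    by_cases h : ('0' ≤ c ∧ c ≤ '9') ∨ ('A' ≤ c ∧ c ≤ 'F') ∨ ('a' ≤ c ∧ c ≤ 'f') <;>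
      simp [dfaStep, h, ih, isHex, run7]

theorem run6 (l : List Char) : l.foldl dfaStep 6 = if l.all isDig then 6 else 7 := by
  induction l with
  | nil => rfl
  | cons c t ih =>
    by_cases h : '0' ≤ c ∧ c ≤ '9' <;>
      simp [dfaStep, h, ih, isDig, run7]

theorem run3 (c : Char) (l : List Char) :
    (c :: l).foldl dfaStep 3 = if (c :: l).all isHex then 4 else 7 := by
  by_cases h : ('0' ≤ c ∧ c ≤ '9') ∨ ('A' ≤ c ∧ c ≤ 'F') ∨ ('a' ≤ c ∧ c ≤ 'f') <;>
    simp [dfaStep, h, run4, run7, isHex]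

theorem run5 (c : Char) (l : List Char) :
    (c :: l).foldl dfaStep 5 = if (c :: l).all isDig then 6 else 7 := by
  by_cases h : '0' ≤ c ∧ c ≤ '9' <;>
    simp [dfaStep, h, run6, run7, isDig]

theorem one_le_of_digit_ne_zero (c : Char) (h0 : c ≠ '0') (h : '0' ≤ c) : '1' ≤ c := by
  have := Char.ext_iff.not.mp h0
  simp [Char.le_def, UInt32.le_iff_toNat_le, UInt32.ext_iff] at *
  omega

theorem digOf (c : Char) (h : '0' ≤ c ∧ c ≤ '9') : isDig c = true := by
  simp only [isDig, decide_eq_true_eq]; exact h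
theorem digNot (c : Char) (h : ¬('0' ≤ c ∧ c ≤ '9')) : isDig c = false := by
  simp only [isDig, decide_eq_false_iff_not]; exact h
theorem dig0 : isDig '0' = true := by decide

theorem altList (cs : List Char) : dfaOut.getD (cs.foldl dfaStep 0) 0 = closedForm cs := by
  cases cs with
  | nil => decide
  | cons c t =>
    by_cases h0 : c = '0'
    · subst h0
      have s1 : dfaStep 0 '0' = 1 := by decide
      cases t with
      | nil => decide
      | cons c2 t2 =>
        rw [List.foldl_cons, s1]
        by_cases hx : c2 = 'x' ∨ c2 = 'X'
        · have s3 : dfaStep 1 c2 = 3 := by rcases hx with h|h <;> subst h <;> decide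
          cases t2 with
          | nil =>
            rw [List.foldl_cons, s3]
            rcases hx with h|h <;> subst h <;> decide
          | cons c3 t3 =>
            rw [List.foldl_cons, s3, run3]
            by_cases hall : ((c3 :: t3).all isHex) = true
            · rw [if_pos hall]
              rcases hx with h|h <;> subst h <;> simp [closedForm, hall] <;> rfl
            · rw [if_neg hall]
              rw [Bool.not_eq_true] at hall
              rcases hx with h|h <;> subst h <;> simp [closedForm, hall, isDig] <;> rfl
        · by_cases ho : c2 = 'o' ∨ c2 = 'O'
          · have s5 : dfaStep 1 c2 = 5 := by rcases ho with h|h <;> subst h <;> decide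
            cases t2 with
            | nil =>
              rw [List.foldl_cons, s5]
              rcases ho with h|h <;> subst h <;> decide
            | cons c3 t3 =>
              rw [List.foldl_cons, s5, run5]
              by_cases hall : ((c3 :: t3).all isDig) = true
              · rw [if_pos hall]
                rcases ho with h|h <;> subst h <;> simp [closedForm, hall] <;> rfl
              · rw [if_neg hall]
                rw [Bool.not_eq_true] at hall
                rcases ho with h|h <;> subst h <;> simp [closedForm, hall, isDig] <;> rfl
          · by_cases hd : '0' ≤ c2 ∧ c2 ≤ '9'
            · have s2 : dfaStep 1 c2 = 2 := by simp [dfaStep, hx, ho, hd]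
              rw [List.foldl_cons, s2, run2]
              have hdig := digOf c2 hd
              have hnx : ¬(3 ≤ ('0' :: c2 :: t2).length ∧
                  (('0' :: c2 :: t2).take 2 = ['0', 'x'] ∨ ('0' :: c2 :: t2).take 2 = ['0', 'X']) ∧
                  (('0' :: c2 :: t2).drop 2).all isHex = true) := by
                rintro ⟨-, h2, -⟩
                rcases h2 with h2|h2 <;> simp at h2 <;> [exact hx (Or.inl h2); exact hx (Or.inr h2)]
              have hno : ¬(3 ≤ ('0' :: c2 :: t2).length ∧
                  (('0' :: c2 :: t2).take 2 = ['0', 'o'] ∨ ('0' :: c2 :: t2).take 2 = ['0', 'O']) ∧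
                  (('0' :: c2 :: t2).drop 2).all isDig = true) := by
                rintro ⟨-, h2, -⟩
                rcases h2 with h2|h2 <;> simp at h2 <;> [exact ho (Or.inl h2); exact ho (Or.inr h2)]
              by_cases hall : (t2.all isDig) = true
              · rw [if_pos hall]
                unfold closedForm
                rw [if_neg hnx, if_neg hno, if_pos (by simp [hdig, hall, dig0])]
                rfl
              · rw [if_neg hall]
                rw [Bool.not_eq_true] at hall
                unfold closedForm
                rw [if_neg hnx, if_neg hno, if_neg (by simp [hall])]
                rfl
            · have s7 : dfaStep 1 c2 = 7 := by simp [dfaStep, hx, ho, hd]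
              rw [List.foldl_cons, s7, run7]
              have hdig := digNot c2 hd
              unfold closedForm
              rw [if_neg, if_neg, if_neg (by simp [hdig])]
              · rfl
              · rintro ⟨-, h2, -⟩
                rcases h2 with h2|h2 <;> simp at h2 <;> [exact ho (Or.inl h2); exact ho (Or.inr h2)]
              · rintro ⟨-, h2, -⟩
                rcases h2 with h2|h2 <;> simp at h2 <;> [exact hx (Or.inl h2); exact hx (Or.inr h2)]
    · by_cases h19 : '1' ≤ c ∧ c ≤ '9'
      · have s2 : dfaStep 0 c = 2 := by simp [dfaStep, h0, h19]
        rw [List.foldl_cons, s2, run2]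
        have hdig : isDig c = true :=
          digOf c ⟨le_trans (by decide : ('0':Char) ≤ '1') h19.1, h19.2⟩
        have hnx : ∀ (y z : Char), ¬(3 ≤ (c :: t).length ∧
            ((c :: t).take 2 = ['0', y] ∨ (c :: t).take 2 = ['0', z]) ∧
            ((c :: t).drop 2).all isHex = true) := by
          rintro y z ⟨-, h2, -⟩
          rcases h2 with h2|h2 <;> (cases t <;> simp at h2) <;> exact h0 h2.1
        have hno : ∀ (y z : Char), ¬(3 ≤ (c :: t).length ∧
            ((c :: t).take 2 = ['0', y] ∨ (c :: t).take 2 = ['0', z]) ∧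
            ((c :: t).drop 2).all isDig = true) := by
          rintro y z ⟨-, h2, -⟩
          rcases h2 with h2|h2 <;> (cases t <;> simp at h2) <;> exact h0 h2.1
        by_cases hall : (t.all isDig) = true
        · rw [if_pos hall]
          unfold closedForm
          rw [if_neg (hnx 'x' 'X'), if_neg (hno 'o' 'O'), if_pos (by simp [hdig, hall])]
          rfl
        · rw [if_neg hall]
          rw [Bool.not_eq_true] at hall
          unfold closedForm
          rw [if_neg (hnx 'x' 'X'), if_neg (hno 'o' 'O'), if_neg (by simp [hall])]
          rfl
      · have s7 : dfaStep 0 c = 7 := by simp [dfaStep, h0, h19]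
        rw [List.foldl_cons, s7, run7]
        have hdig : isDig c = false := by
          apply digNot
          rintro ⟨h1, h2⟩
          exact h19 ⟨one_le_of_digit_ne_zero c h0 h1, h2⟩
        have hnx : ∀ (y z : Char) (p : Char → Bool), ¬(3 ≤ (c :: t).length ∧
            ((c :: t).take 2 = ['0', y] ∨ (c :: t).take 2 = ['0', z]) ∧
            ((c :: t).drop 2).all p = true) := by
          rintro y z p ⟨-, h2, -⟩
          rcases h2 with h2|h2 <;> (cases t <;> simp at h2) <;> exact h0 h2.1
        unfold closedForm
        rw [if_neg (hnx 'x' 'X' isHex), if_neg (hnx 'o' 'O' isDig), if_neg (by simp [hdig])]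
        rfl

theorem alt_closed (x : String) : judgenum_alt x = closedForm x.toList := by
  unfold judgenum_alt
  exact altList x.toList

-- ===== VERDICT (by name: the statement is the Claim_ definition above) =====
theorem judgenum_spec : Claim_equal_judgenum := by
  intro x _
  unfold Spec_judgenum
  rw [judgenum_closed, alt_closed]
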